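-- pv_equiv track=rewrite | github.com/Tsaitung/Orderly | scripts/ci/detect-changes.py | get_dependent_services
-- ===== SOURCE A (Python) =====
-- from typing import Set, List, Dict, Any
--
-- def get_dependent_services(service: str, manifest: Dict[str, Any]) -> Set[str]:
--     """Get all services that depend on the given service"""
--     dependents = set()
--     services = manifest.get("services", {})
--
--     for other_service, config in services.items():
--         if service in config.get("depends_on", []):
--             dependents.add(other_service)
--             # Recursively get dependents of dependents
--             dependents.update(get_dependent_services(other_service, manifest))
--
--     return dependents
-- ===== SOURCE B (Python) =====
-- def get_dependent_services(service, manifest):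
--     """Get all services that depend on the given service"""
--     services = manifest.get("services", {})
--     # Build the reverse dependency index once: dep -> [services that list it]
--     rev = {}
--     for name, config in services.items():
--         for dep in set(config.get("depends_on", [])):
--             rev.setdefault(dep, []).append(name)
--     # DFS over the reverse graph with a visited accumulator
--
--     def visit(node, acc):
--         for nxt in rev.get(node, []):
--             if nxt not in acc:
--                 acc.append(nxt)
--                 visit(nxt, acc)
--         return acc
--
--     return set(visit(service, []))
-- ===== Notes on version B (the rewrite author's own statement) =====
-- stated objective: alternative
-- what changed: A discovers dependents by recursively rescanning the whole services dict for every dependent found (recomputing subtrees redundantly, RecursionError on cycles); B builds a reverse dependency index once and runs a single DFS with a visited accumulator, visiting each service at most once.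
import Mathlib
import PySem

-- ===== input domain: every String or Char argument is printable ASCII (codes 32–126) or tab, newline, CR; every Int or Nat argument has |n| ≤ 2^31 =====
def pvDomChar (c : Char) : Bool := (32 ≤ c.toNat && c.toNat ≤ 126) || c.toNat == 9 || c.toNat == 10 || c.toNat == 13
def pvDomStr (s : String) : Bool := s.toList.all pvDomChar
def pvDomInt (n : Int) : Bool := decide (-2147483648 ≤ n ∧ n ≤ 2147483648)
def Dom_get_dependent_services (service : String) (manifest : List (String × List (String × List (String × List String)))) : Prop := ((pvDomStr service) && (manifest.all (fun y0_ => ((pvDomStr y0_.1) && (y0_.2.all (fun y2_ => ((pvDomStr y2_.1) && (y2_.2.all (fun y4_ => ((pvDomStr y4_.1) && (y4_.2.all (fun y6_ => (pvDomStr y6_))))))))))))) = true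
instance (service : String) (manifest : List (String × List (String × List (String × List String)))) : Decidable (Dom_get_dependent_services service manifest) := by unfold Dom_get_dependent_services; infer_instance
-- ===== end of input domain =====

-- B replaces A's per-service recursive rescan (which recomputes whole dependent sets again for
-- every discovered dependent and overflows the recursion stack on cycles) by ONE reverse
-- dependency index plus a single DFS with a visited accumulator (objective: alternative).
-- The equivalence is about the return value; neither version mutates its arguments.

abbrev PvCfg := List (String × List String)
abbrev PvSvcs := List (String × PvCfg)
abbrev PvManifest := List (String × PvSvcs)

-- the two Python dict lookups both programs perform, ported literally
def pvSv (manifest : PvManifest) : PvSvcs := PySem.Dict.getD (PySem.Dict.mk manifest) "services" []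
def pvDeps (config : PvCfg) : List String := PySem.Dict.getD (PySem.Dict.mk config) "depends_on" []

-- ===== PORT A =====
-- Python A's recursion is unbounded (RecursionError on cycles, which Pre_ excludes); on the
-- inputs Pre_ admits every dependent chain is shorter than |services|+1, so that fuel makes the
-- port exact there (proved via pvMAIN below).

def pvRecA (manifest : PvManifest) : Nat → String → List String
  | 0, _ => PySem.Set.empty
  | f+1, service =>
    (pvSv manifest).foldl
      (fun dependents oc =>
        if service ∈ pvDeps oc.2 then
          PySem.Set.update (PySem.Set.add dependents oc.1) (pvRecA manifest f oc.1)
        else dependents)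
      PySem.Set.empty

def get_dependent_services (service : String) (manifest : List (String × List (String × List (String × List String)))) : List String :=
  pvRecA manifest ((pvSv manifest).length + 1) service

-- ===== PORT B =====
-- rev.setdefault(dep, []).append(name)  =  insert dep (rev.get(dep, []) ++ [name])

def pvRev (services : PvSvcs) : PySem.Dict String (List String) :=
  services.foldl
    (fun rev nc =>
      (PySem.Set.ofList (pvDeps nc.2)).foldl
        (fun rev dep => PySem.Dict.insert rev dep (PySem.Dict.getD rev dep [] ++ [nc.1]))
        rev)
    PySem.Dict.empty

-- Source B's `visit` recursion; its depth is bounded by |services|+1 because every nested call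
-- first appends a fresh service name to acc, so that fuel makes the port exact on every input.

def pvVisitB (rev : PySem.Dict String (List String)) : Nat → String → List String → List String
  | 0, _, acc => acc
  | f+1, node, acc =>
    (PySem.Dict.getD rev node []).foldl
      (fun acc nxt => if nxt ∈ acc then acc else pvVisitB rev f nxt (acc ++ [nxt]))
      acc

def get_dependent_services_alt (service : String) (manifest : List (String × List (String × List (String × List String)))) : List String :=
  PySem.Set.ofList (pvVisitB (pvRev (pvSv manifest)) ((pvSv manifest).length + 1) service [])

-- ===== PRECONDITION & SPEC =====
-- reverse-dependency edges: the services whose depends_on lists contain s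

def pvSuccs (services : PvSvcs) (s : String) : List String :=
  (services.filter (fun oc => s ∈ pvDeps oc.2)).map (fun oc => oc.1)

def pvStep (services : PvSvcs) (R : List String) : List String :=
  R.foldl (fun r x => PySem.Set.update r (pvSuccs services x)) R

def pvClosure (services : PvSvcs) (L : List String) : List String :=
  (pvStep services)^[services.length + 1] (PySem.Set.ofList L)

-- Pre_ excludes exactly the manifests where a depends_on cycle is reachable from `service`
-- along reverse edges: there Python A's unbounded recursion raises RecursionError.
def Pre_get_dependent_services (service : String) (manifest : List (String × List (String × List (String × List String)))) : Prop :=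
  ∀ r ∈ pvClosure (pvSv manifest) [service], r ∉ pvClosure (pvSv manifest) (pvSuccs (pvSv manifest) r)
instance (service : String) (manifest : List (String × List (String × List (String × List String)))) : Decidable (Pre_get_dependent_services service manifest) := by unfold Pre_get_dependent_services; infer_instance

def pvWitness_get_dependent_services : String × (List (String × List (String × List (String × List String)))) :=
  ("a", [("services", [("b", [("depends_on", ["a"])]), ("c", [("depends_on", ["b"])])])])

def Spec_get_dependent_services (service : String) (manifest : List (String × List (String × List (String × List String)))) (out : List String) : Prop := out = get_dependent_services_alt service manifest
instance (service : String) (manifest : List (String × List (String × List (String × List String)))) (out : List String) : Decidable (Spec_get_dependent_services service manifest out) := by unfold Spec_get_dependent_services; infer_instance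

-- ===== CLAIM (what is proved, stated in full; the proofs are below) =====
def Claim_equal_get_dependent_services : Prop := ∀ (service : String) (manifest : List (String × List (String × List (String × List String)))), Dom_get_dependent_services service manifest → Pre_get_dependent_services service manifest → Spec_get_dependent_services service manifest (get_dependent_services service manifest)

-- ===== LEMMAS AND PROOFS =====

def pvReach (svs : PvSvcs) (a b : String) : Prop :=
  Relation.ReflTransGen (fun x y => y ∈ pvSuccs svs x) a b

theorem pv_add_prefix (s : List String) (x : String) : s <+: PySem.Set.add s x := by
  rw [PySem.Set.add_eq_ite]; split
  · exact List.prefix_refl s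
  · exact ⟨[x], rfl⟩

theorem pv_update_prefix (s xs : List String) : s <+: PySem.Set.update s xs := by
  induction xs generalizing s with
  | nil => rw [PySem.Set.update_nil]
  | cons a l ih =>
    rw [PySem.Set.update_cons]
    exact (pv_add_prefix s a).trans (ih _)

theorem pv_update_of_subset (s xs : List String) (h : ∀ x ∈ xs, x ∈ s) :
    PySem.Set.update s xs = s := by
  induction xs with
  | nil => rw [PySem.Set.update_nil]
  | cons a l ih =>
    rw [PySem.Set.update_cons, PySem.Set.add_of_mem (h a (List.mem_cons_self ..))]
    exact ih (fun x hx => h x (List.mem_cons_of_mem _ hx))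

theorem pv_update_add (S X : List String) (x : String) :
    PySem.Set.update S (PySem.Set.add X x) = PySem.Set.add (PySem.Set.update S X) x := by
  by_cases hx : x ∈ X
  · rw [PySem.Set.add_of_mem hx, PySem.Set.add_of_mem ((PySem.Set.mem_update _ _ _).2 (Or.inr hx))]
  · rw [PySem.Set.add_of_not_mem hx, PySem.Set.update_append, PySem.Set.update_cons,
      PySem.Set.update_nil]

theorem pv_update_update (r S X : List String) :
    PySem.Set.update S (PySem.Set.update X r) = PySem.Set.update (PySem.Set.update S X) r := by
  induction r generalizing X with
  | nil => rw [PySem.Set.update_nil, PySem.Set.update_nil]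
  | cons a l ih =>
    rw [PySem.Set.update_cons, PySem.Set.update_cons, ih, pv_update_add]

theorem pv_update_mono (s xs : List String) (x : String) (h : x ∈ s) : x ∈ PySem.Set.update s xs :=
  (PySem.Set.mem_update _ _ _).2 (Or.inl h)

theorem pv_mem_foldl_update (svs : PvSvcs) (l s : List String) (y : String) :
    y ∈ l.foldl (fun r x => PySem.Set.update r (pvSuccs svs x)) s ↔
      y ∈ s ∨ ∃ x ∈ l, y ∈ pvSuccs svs x := by
  induction l generalizing s with
  | nil => simp
  | cons a l ih =>
    simp only [List.foldl_cons, ih, PySem.Set.mem_update, List.mem_cons]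
    constructor
    · rintro ((h | h) | ⟨x, hx, h⟩)
      · exact Or.inl h
      · exact Or.inr ⟨a, Or.inl rfl, h⟩
      · exact Or.inr ⟨x, Or.inr hx, h⟩
    · rintro (h | ⟨x, (rfl | hx), h⟩)
      · exact Or.inl (Or.inl h)
      · exact Or.inl (Or.inr h)
      · exact Or.inr ⟨x, hx, h⟩

theorem pv_mem_pvStep (svs : PvSvcs) (R : List String) (y : String) :
    y ∈ pvStep svs R ↔ y ∈ R ∨ ∃ x ∈ R, y ∈ pvSuccs svs x :=
  pv_mem_foldl_update svs R R y

-- new material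

theorem pvStep_prefix' (svs : PvSvcs) (l s : List String) :
    s <+: l.foldl (fun r x => PySem.Set.update r (pvSuccs svs x)) s := by
  induction l generalizing s with
  | nil => exact List.prefix_refl s
  | cons a t ih => exact (pv_update_prefix s _).trans (ih _)

theorem pvStep_prefix2 (svs : PvSvcs) (R : List String) : R <+: pvStep svs R :=
  pvStep_prefix' svs R R

theorem pvStep_nodup' (svs : PvSvcs) (l s : List String) (h : s.Nodup) :
    (l.foldl (fun r x => PySem.Set.update r (pvSuccs svs x)) s).Nodup := by
  induction l generalizing s with
  | nil => exact h
  | cons a t ih => exact ih _ (PySem.Set.nodup_update _ _ h)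

theorem pvStep_nodup (svs : PvSvcs) (R : List String) (h : R.Nodup) : (pvStep svs R).Nodup :=
  pvStep_nodup' svs R R h

theorem pv_iter_prefix (svs : PvSvcs) (s : List String) (n m : Nat) (hnm : n ≤ m) :
    (pvStep svs)^[n] s <+: (pvStep svs)^[m] s := by
  induction m with
  | zero => simp_all
  | succ m ih =>
    rcases Nat.lt_or_ge n (m+1) with h | h
    · rw [Function.iterate_succ_apply']
      exact (ih (Nat.lt_succ_iff.1 h)).trans (pvStep_prefix2 svs _)
    · have : n = m + 1 := Nat.le_antisymm hnm h
      subst this; exact List.prefix_refl _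

theorem pv_succs_mem_names (svs : PvSvcs) (x y : String) (h : y ∈ pvSuccs svs x) :
    y ∈ svs.map Prod.fst := by
  rcases List.mem_map.1 h with ⟨oc, hoc, rfl⟩
  exact List.mem_map.2 ⟨oc, List.mem_of_mem_filter hoc, rfl⟩

theorem pv_iter_nodup (svs : PvSvcs) (L : List String) (n : Nat) :
    ((pvStep svs)^[n] (PySem.Set.ofList L)).Nodup := by
  induction n with
  | zero => exact PySem.Set.nodup_ofList L
  | succ n ih => rw [Function.iterate_succ_apply']; exact pvStep_nodup svs _ ih

theorem pv_iter_pool (svs : PvSvcs) (L : List String) (n : Nat) (x : String)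
    (hx : x ∈ (pvStep svs)^[n] (PySem.Set.ofList L)) : x ∈ L ∨ x ∈ svs.map Prod.fst := by
  induction n generalizing x with
  | zero => exact Or.inl ((PySem.Set.mem_ofList _ _).1 hx)
  | succ n ih =>
    rw [Function.iterate_succ_apply'] at hx
    rcases (pv_mem_pvStep svs _ x).1 hx with h | ⟨z, _, h⟩
    · exact ih x h
    · exact Or.inr (pv_succs_mem_names svs z x h)

theorem pv_iter_len_le (svs : PvSvcs) (L : List String) (n : Nat) :
    ((pvStep svs)^[n] (PySem.Set.ofList L)).length ≤ (PySem.Set.ofList (L ++ svs.map Prod.fst)).length := by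
  have hsub : (pvStep svs)^[n] (PySem.Set.ofList L) ⊆ PySem.Set.ofList (L ++ svs.map Prod.fst) := by
    intro x hx
    rcases pv_iter_pool svs L n x hx with h | h
    · exact (PySem.Set.mem_ofList _ _).2 (List.mem_append.2 (Or.inl h))
    · exact (PySem.Set.mem_ofList _ _).2 (List.mem_append.2 (Or.inr h))
  exact ((pv_iter_nodup svs L n).subperm hsub).length_le

theorem pvClosure_fix (svs : PvSvcs) (L : List String)
    (hLb : (PySem.Set.ofList (L ++ svs.map Prod.fst)).length ≤ svs.length + 1) :
    pvStep svs (pvClosure svs L) = pvClosure svs L := by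
  set N := svs.length with hN
  have hfix : ∃ n, n ≤ N + 1 ∧ pvStep svs ((pvStep svs)^[n] (PySem.Set.ofList L)) = (pvStep svs)^[n] (PySem.Set.ofList L) := by
    by_contra hc
    push Not at hc
    have grow : ∀ m, m ≤ N + 2 → m ≤ ((pvStep svs)^[m] (PySem.Set.ofList L)).length := by
      intro m
      induction m with
      | zero => intro _; exact Nat.zero_le _
      | succ m ih =>
        intro hm
        have h1 := ih (Nat.le_of_succ_le hm)
        have hne := hc m (by omega)
        have hpre := pvStep_prefix2 svs ((pvStep svs)^[m] (PySem.Set.ofList L))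
        have hlt : ((pvStep svs)^[m] (PySem.Set.ofList L)).length < (pvStep svs ((pvStep svs)^[m] (PySem.Set.ofList L))).length := by
          rcases Nat.lt_or_ge ((pvStep svs)^[m] (PySem.Set.ofList L)).length (pvStep svs ((pvStep svs)^[m] (PySem.Set.ofList L))).length with h | h
          · exact h
          · exact absurd (List.IsPrefix.eq_of_length_le hpre h).symm hne
        rw [Function.iterate_succ_apply']
        omega
    have := grow (N + 2) (le_refl _)
    have := pv_iter_len_le svs L (N + 2)
    omega
  rcases hfix with ⟨n, hn, hfx⟩
  have hstable : (pvStep svs)^[N + 1] (PySem.Set.ofList L) = (pvStep svs)^[n] (PySem.Set.ofList L) := by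
    have : N + 1 = (N + 1 - n) + n := by omega
    rw [this, Function.iterate_add_apply]
    exact Function.iterate_fixed hfx (N + 1 - n)
  show pvStep svs ((pvStep svs)^[N+1] _) = (pvStep svs)^[N+1] _
  rw [hstable, hfx]

theorem pvClosure_base (svs : PvSvcs) (L : List String) (x : String) (hx : x ∈ L) :
    x ∈ pvClosure svs L :=
  (pv_iter_prefix svs (PySem.Set.ofList L) 0 (svs.length + 1) (Nat.zero_le _)).subset
    ((PySem.Set.mem_ofList _ _).2 hx)

theorem pvClosure_nodup (svs : PvSvcs) (L : List String) : (pvClosure svs L).Nodup :=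
  pv_iter_nodup svs L (svs.length + 1)

theorem pvClosure_closed (svs : PvSvcs) (L : List String)
    (hLb : (PySem.Set.ofList (L ++ svs.map Prod.fst)).length ≤ svs.length + 1)
    (x : String) (hx : x ∈ pvClosure svs L) (y : String) (hy : y ∈ pvSuccs svs x) :
    y ∈ pvClosure svs L := by
  have := (pv_mem_pvStep svs (pvClosure svs L) y).2 (Or.inr ⟨x, hx, hy⟩)
  rwa [pvClosure_fix svs L hLb] at this

theorem pv_reach_mem_closure (svs : PvSvcs) (L : List String)
    (hLb : (PySem.Set.ofList (L ++ svs.map Prod.fst)).length ≤ svs.length + 1)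
    (l x : String) (hl : l ∈ L) (hr : pvReach svs l x) : x ∈ pvClosure svs L := by
  induction hr with
  | refl => exact pvClosure_base svs L l hl
  | tail h1 h2 ih => exact pvClosure_closed svs L hLb _ ih _ h2

theorem pv_iter_sound (svs : PvSvcs) (L : List String) (n : Nat) (x : String)
    (hx : x ∈ (pvStep svs)^[n] (PySem.Set.ofList L)) : ∃ l ∈ L, pvReach svs l x := by
  induction n generalizing x with
  | zero => exact ⟨x, (PySem.Set.mem_ofList _ _).1 hx, Relation.ReflTransGen.refl⟩
  | succ n ih =>
    rw [Function.iterate_succ_apply'] at hx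
    rcases (pv_mem_pvStep svs _ x).1 hx with h | ⟨z, hz, h⟩
    · exact ih x h
    · rcases ih z hz with ⟨l, hl, hr⟩
      exact ⟨l, hl, Relation.ReflTransGen.tail hr h⟩

theorem pv_mem_closure_reach (svs : PvSvcs) (L : List String) (x : String)
    (hx : x ∈ pvClosure svs L) : ∃ l ∈ L, pvReach svs l x :=
  pv_iter_sound svs L (svs.length + 1) x hx

theorem pv_closure_min (svs : PvSvcs) (L X E : List String)
    (hX : ∀ x ∈ X, x ∉ E → ∀ y ∈ pvSuccs svs x, y ∈ X)
    (hL : ∀ x ∈ L, x ∈ X)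
    (hE : ∀ e ∈ E, ∀ l ∈ L, ¬ pvReach svs l e)
    (x : String) (hx : x ∈ pvClosure svs L) : x ∈ X := by
  suffices h : ∀ n, ∀ x ∈ (pvStep svs)^[n] (PySem.Set.ofList L), x ∈ X from
    h (svs.length + 1) x hx
  intro n
  induction n with
  | zero => intro x hx; exact hL x ((PySem.Set.mem_ofList _ _).1 hx)
  | succ n ih =>
    intro x hx
    rw [Function.iterate_succ_apply'] at hx
    rcases (pv_mem_pvStep svs _ x).1 hx with h | ⟨z, hz, h⟩
    · exact ih x h
    · have hzX := ih z hz
      have hzE : z ∉ E := by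
        intro hzE
        rcases pv_iter_sound svs L n z hz with ⟨l, hl, hr⟩
        exact hE z hzE l hl hr
      exact hX z hzX hzE x h

theorem pv_reach_names (svs : PvSvcs) (a x : String) (h : pvReach svs a x) :
    x = a ∨ x ∈ svs.map Prod.fst := by
  induction h with
  | refl => exact Or.inl rfl
  | tail h1 h2 _ => exact Or.inr (pv_succs_mem_names svs _ _ h2)

theorem pv_hLb_singleton (svs : PvSvcs) (x : String) :
    (PySem.Set.ofList ([x] ++ svs.map Prod.fst)).length ≤ svs.length + 1 := by
  refine le_trans (PySem.Set.length_ofList_le _) ?_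
  simp

theorem pv_hLb_sub_names (svs : PvSvcs) (L : List String) (hL : ∀ x ∈ L, x ∈ svs.map Prod.fst) :
    (PySem.Set.ofList (L ++ svs.map Prod.fst)).length ≤ svs.length + 1 := by
  have hsub : PySem.Set.ofList (L ++ svs.map Prod.fst) ⊆ svs.map Prod.fst := by
    intro x hx
    rcases List.mem_append.1 ((PySem.Set.mem_ofList _ _).1 hx) with h | h
    · exact hL x h
    · exact h
  have := ((PySem.Set.nodup_ofList _).subperm hsub).length_le
  simp at this; omega

theorem pv_anc_not_in_cl (svs : PvSvcs) (root e p o : String)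
    (hPre : ∀ r ∈ pvClosure svs [root], r ∉ pvClosure svs (pvSuccs svs r))
    (hre : pvReach svs root e) (hep : pvReach svs e p) (ho : o ∈ pvSuccs svs p) :
    e ∉ pvClosure svs [o] := by
  intro hmem
  have heCl : e ∈ pvClosure svs [root] :=
    pv_reach_mem_closure svs [root] (pv_hLb_singleton svs root) root e (List.mem_singleton.2 rfl) hre
  rcases pv_mem_closure_reach svs [o] e hmem with ⟨l, hl, hoe⟩
  rw [List.mem_singleton] at hl; rw [hl] at hoe; clear hl
  have hsucc_sub : ∀ x ∈ pvSuccs svs e, x ∈ svs.map Prod.fst := fun x hx => pv_succs_mem_names svs e x hx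
  have hLb := pv_hLb_sub_names svs (pvSuccs svs e) hsucc_sub
  rcases Relation.ReflTransGen.cases_head hep with rfl | ⟨c, hc, hcp⟩
  · -- e = p : o ∈ succs e and Reach o e
    exact hPre e heCl (pv_reach_mem_closure svs (pvSuccs svs e) hLb o e ho hoe)
  · -- step e c, Reach c p, Reach p o (single), Reach o e
    have hce : pvReach svs c e :=
      (hcp.trans (Relation.ReflTransGen.single ho)).trans hoe
    exact hPre e heCl (pv_reach_mem_closure svs (pvSuccs svs e) hLb c e hc hce)

theorem pv_cl_lt (svs : PvSvcs) (p o : String) (ho : o ∈ pvSuccs svs p)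
    (hp : p ∉ pvClosure svs [o]) :
    (pvClosure svs [o]).length < (pvClosure svs [p]).length := by
  have hpin : p ∈ pvClosure svs [p] := pvClosure_base svs [p] p (List.mem_singleton.2 rfl)
  have hsub : pvClosure svs [o] ⊆ pvClosure svs [p] := by
    intro x hx
    apply pv_closure_min svs [o] (pvClosure svs [p]) []
      (fun x hx _ y hy => pvClosure_closed svs [p] (pv_hLb_singleton svs p) x hx y hy)
      (fun x hx => by
        rw [List.mem_singleton] at hx; rw [hx]
        exact pvClosure_closed svs [p] (pv_hLb_singleton svs p) p hpin o ho)
      (fun e he => absurd he (List.not_mem_nil))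
      x hx
  have hsub2 : pvClosure svs [o] ⊆ (pvClosure svs [p]).erase p := by
    intro x hx
    refine (List.mem_erase_of_ne ?_).2 (hsub hx)
    rintro rfl; exact hp hx
  have hle := ((pvClosure_nodup svs [o]).subperm hsub2).length_le
  have h2 := List.length_erase_of_mem hpin
  have h3 := List.length_pos_of_mem hpin
  omega

theorem pv_succs_cons (nc : String × PvCfg) (t : PvSvcs) (c : String) :
    pvSuccs (nc :: t) c
      = (if c ∈ pvDeps nc.2 then [nc.1] else []) ++ pvSuccs t c := by
  unfold pvSuccs
  rw [List.filter_cons]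
  by_cases h : c ∈ pvDeps nc.2
  · simp [h]
  · simp [h]

theorem pv_rev_inner (l : List String) (hnd : l.Nodup) (rev : PySem.Dict String (List String))
    (name c : String) :
    PySem.Dict.getD (l.foldl (fun r dep => PySem.Dict.insert r dep (PySem.Dict.getD r dep [] ++ [name])) rev) c []
      = PySem.Dict.getD rev c [] ++ (if c ∈ l then [name] else []) := by
  induction l generalizing rev with
  | nil => simp
  | cons d t ih =>
    rw [List.foldl_cons, ih (List.Nodup.of_cons hnd)]
    rw [PySem.Dict.getD_insert]
    rcases List.nodup_cons.1 hnd with ⟨hd, _⟩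
    by_cases hc : c = d
    · subst hc
      simp [hd]
    · simp [hc, List.mem_cons]

def pvRevStep (nc : String × PvCfg) (rev : PySem.Dict String (List String)) : PySem.Dict String (List String) :=
  (PySem.Set.ofList (pvDeps nc.2)).foldl
    (fun rev dep => PySem.Dict.insert rev dep (PySem.Dict.getD rev dep [] ++ [nc.1])) rev

theorem pv_rev_outer (l : PvSvcs) (rev : PySem.Dict String (List String)) (c : String) :
    PySem.Dict.getD (l.foldl (fun rev nc => pvRevStep nc rev) rev) c []
      = PySem.Dict.getD rev c [] ++ pvSuccs l c := by
  induction l generalizing rev with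
  | nil => simp [pvSuccs]
  | cons nc t ih =>
    rw [List.foldl_cons, ih, pv_succs_cons]
    show PySem.Dict.getD (pvRevStep nc rev) c [] ++ _ = _
    rw [pvRevStep, pv_rev_inner _ (PySem.Set.nodup_ofList _)]
    by_cases h : c ∈ pvDeps nc.2
    · simp [h, PySem.Set.mem_ofList]
    · simp [h, PySem.Set.mem_ofList]

theorem pv_foldl_filter_map {α β γ : Type} (P : α → Prop) [DecidablePred P]
    (g : β → γ → β) (h : α → γ) (l : List α) (init : β) :
    l.foldl (fun a x => if P x then g a (h x) else a) init
      = ((l.filter (fun x => decide (P x))).map h).foldl g init := by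
  induction l generalizing init with
  | nil => rfl
  | cons a l ih =>
    simp only [List.foldl_cons, List.filter_cons]
    by_cases hp : P a
    · simp [hp, ih]
    · simp [hp, ih]

theorem pvRecA_succ (manifest : PvManifest) (f : Nat) (s : String) :
    pvRecA manifest (f+1) s
      = (pvSuccs (pvSv manifest) s).foldl
          (fun dep o => PySem.Set.update (PySem.Set.add dep o) (pvRecA manifest f o)) [] := by
  show (pvSv manifest).foldl _ PySem.Set.empty = _
  rw [pv_foldl_filter_map (fun oc : String × PvCfg => s ∈ pvDeps oc.2)
    (fun dep o => PySem.Set.update (PySem.Set.add dep o) (pvRecA manifest f o)) (fun oc => oc.1)]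
  rfl

theorem pv_mem_foldA (manifest : PvManifest) (f : Nat) (l : List String)
    (dep : List String) (y : String)
    (hy : y ∈ l.foldl (fun dep o => PySem.Set.update (PySem.Set.add dep o) (pvRecA manifest f o)) dep) :
    y ∈ dep ∨ ∃ o ∈ l, y = o ∨ y ∈ pvRecA manifest f o := by
  induction l generalizing dep with
  | nil => exact Or.inl hy
  | cons a l ih =>
    rcases ih _ hy with h | ⟨o, ho, h⟩
    · rcases (PySem.Set.mem_update _ _ _).1 h with h | h
      · rcases (PySem.Set.mem_add _ _ _).1 h with h | h
        · exact Or.inl h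
        · exact Or.inr ⟨a, List.mem_cons_self .., Or.inl h⟩
      · exact Or.inr ⟨a, List.mem_cons_self .., Or.inr h⟩
    · exact Or.inr ⟨o, List.mem_cons_of_mem _ ho, h⟩

theorem pvRecA_sound (manifest : PvManifest) (f : Nat) (s y : String)
    (hy : y ∈ pvRecA manifest f s) : ∃ o ∈ pvSuccs (pvSv manifest) s, pvReach (pvSv manifest) o y := by
  induction f generalizing s with
  | zero => cases hy
  | succ f ih =>
    rw [pvRecA_succ] at hy
    rcases pv_mem_foldA manifest f _ [] y hy with h | ⟨o, ho, h | h⟩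
    · cases h
    · exact ⟨o, ho, h ▸ Relation.ReflTransGen.refl⟩
    · rcases ih o h with ⟨o', ho', hr⟩
      exact ⟨o, ho, Relation.ReflTransGen.head ho' hr⟩

theorem pvRev_getD (svs : PvSvcs) (k : String) :
    PySem.Dict.getD (pvRev svs) k [] = pvSuccs svs k := by
  have h := pv_rev_outer svs PySem.Dict.empty k
  simp only [pvRevStep] at h
  rw [show pvRev svs = svs.foldl (fun rev nc => (PySem.Set.ofList (pvDeps nc.2)).foldl
        (fun rev dep => PySem.Dict.insert rev dep (PySem.Dict.getD rev dep [] ++ [nc.1])) rev) PySem.Dict.empty from rfl]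
  rw [h, PySem.Dict.getD_empty]
  simp

theorem pv_foldA_prefix (manifest : PvManifest) (fA : Nat) (l dep : List String) :
    dep <+: l.foldl (fun dep o => PySem.Set.update (PySem.Set.add dep o) (pvRecA manifest fA o)) dep := by
  induction l generalizing dep with
  | nil => exact List.prefix_refl dep
  | cons o t ih =>
    exact ((pv_add_prefix dep o).trans (pv_update_prefix _ _)).trans (ih _)

theorem pvRecA_nodup (manifest : PvManifest) (f : Nat) (s : String) : (pvRecA manifest f s).Nodup := by
  induction f generalizing s with
  | zero => exact List.nodup_nil
  | succ f ih =>
    rw [pvRecA_succ]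
    have : ∀ (l dep : List String), dep.Nodup →
        (l.foldl (fun dep o => PySem.Set.update (PySem.Set.add dep o) (pvRecA manifest f o)) dep).Nodup := by
      intro l
      induction l with
      | nil => intro dep h; exact h
      | cons o t iht =>
        intro dep h
        exact iht _ (PySem.Set.nodup_update _ _ (PySem.Set.nodup_add _ _ h))
    exact this _ [] List.nodup_nil

theorem pvRecA_names (manifest : PvManifest) (f : Nat) (s x : String)
    (hx : x ∈ pvRecA manifest f s) : x ∈ (pvSv manifest).map Prod.fst := by
  rcases pvRecA_sound manifest f s x hx with ⟨o, ho, hr⟩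
  rcases pv_reach_names (pvSv manifest) o x hr with rfl | h
  · exact pv_succs_mem_names _ s x ho
  · exact h

theorem pv_recA_sub (manifest : PvManifest) (root p o : String) (P S : List String) (f : Nat)
    (hPre : ∀ r ∈ pvClosure (pvSv manifest) [root], r ∉ pvClosure (pvSv manifest) (pvSuccs (pvSv manifest) r))
    (hanc : ∀ q ∈ p :: P, pvReach (pvSv manifest) root q ∧ pvReach (pvSv manifest) q p)
    (hSclosed : ∀ x ∈ S, x ∉ p :: P → ∀ y ∈ pvSuccs (pvSv manifest) x, y ∈ S)
    (ho : o ∈ pvSuccs (pvSv manifest) p) (hoS : o ∈ S) :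
    ∀ x ∈ pvRecA manifest f o, x ∈ S := by
  have hE : ∀ e ∈ p :: P, ∀ l ∈ [o], ¬ pvReach (pvSv manifest) l e := by
    intro e he l hl hr
    rw [List.mem_singleton] at hl
    rw [hl] at hr
    exact pv_anc_not_in_cl (pvSv manifest) root e p o hPre (hanc e he).1 (hanc e he).2 ho
      (pv_reach_mem_closure _ [o] (pv_hLb_singleton _ o) o e (List.mem_singleton.2 rfl) hr)
  have hsub : ∀ x ∈ pvClosure (pvSv manifest) [o], x ∈ S :=
    pv_closure_min (pvSv manifest) [o] S (p :: P) hSclosed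
      (fun x hx => by rw [List.mem_singleton] at hx; rw [hx]; exact hoS) hE
  intro x hx
  rcases pvRecA_sound manifest f o x hx with ⟨o', ho', hr⟩
  exact hsub x (pv_reach_mem_closure _ [o] (pv_hLb_singleton _ o) o x (List.mem_singleton.2 rfl)
    (Relation.ReflTransGen.head ho' hr))

theorem pv_fA_child (manifest : PvManifest) (root p o : String) (fA : Nat)
    (hPre : ∀ r ∈ pvClosure (pvSv manifest) [root], r ∉ pvClosure (pvSv manifest) (pvSuccs (pvSv manifest) r))
    (hrootp : pvReach (pvSv manifest) root p)
    (ho : o ∈ pvSuccs (pvSv manifest) p)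
    (hfA : (pvClosure (pvSv manifest) [p]).length ≤ fA + 1) :
    (pvClosure (pvSv manifest) [o]).length ≤ fA := by
  have hpo := pv_anc_not_in_cl (pvSv manifest) root p p o hPre hrootp Relation.ReflTransGen.refl ho
  have := pv_cl_lt (pvSv manifest) p o ho hpo
  omega

theorem pvMAIN (manifest : PvManifest) (root : String)
    (hPre : ∀ r ∈ pvClosure (pvSv manifest) [root], r ∉ pvClosure (pvSv manifest) (pvSuccs (pvSv manifest) r))
    (fA : Nat) :
    ∀ (fB : Nat) (p : String) (P acc : List String),
      pvReach (pvSv manifest) root p →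
      (∀ q ∈ p :: P, pvReach (pvSv manifest) root q ∧ pvReach (pvSv manifest) q p) →
      (∀ x ∈ acc, pvReach (pvSv manifest) root x) →
      acc.Nodup →
      (∀ x ∈ acc, x ∈ (pvSv manifest).map Prod.fst) →
      (∀ x ∈ acc, x ∉ p :: P → ∀ y ∈ pvSuccs (pvSv manifest) x, y ∈ acc) →
      (pvClosure (pvSv manifest) [p]).length ≤ fA →
      (pvSv manifest).length + 1 ≤ fB + acc.length →
      pvVisitB (pvRev (pvSv manifest)) fB p acc = PySem.Set.update acc (pvRecA manifest fA p)
      ∧ (∀ x ∈ PySem.Set.update acc (pvRecA manifest fA p), x ∉ p :: P →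
            ∀ y ∈ pvSuccs (pvSv manifest) x, y ∈ PySem.Set.update acc (pvRecA manifest fA p))
      ∧ (∀ y ∈ pvSuccs (pvSv manifest) p, y ∈ PySem.Set.update acc (pvRecA manifest fA p)) := by
  induction fA with
  | zero =>
    intro fB p P acc _ _ _ _ _ _ hfA _
    exfalso
    have := List.length_pos_of_mem (pvClosure_base (pvSv manifest) [p] p (List.mem_singleton.2 rfl))
    omega
  | succ fA ihA =>
    intro fB p P acc hrootp hanc haccR haccN haccNames hclosed hfA hfB
    have haccLen : acc.length ≤ (pvSv manifest).length := by
      have h := (haccN.subperm (fun x hx => haccNames x hx)).length_le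
      simpa using h
    obtain ⟨fB', rfl⟩ : ∃ fB', fB = fB' + 1 := ⟨fB - 1, by omega⟩
    have hBunfold : pvVisitB (pvRev (pvSv manifest)) (fB' + 1) p acc
        = (pvSuccs (pvSv manifest) p).foldl
            (fun acc nxt => if nxt ∈ acc then acc
              else pvVisitB (pvRev (pvSv manifest)) fB' nxt (acc ++ [nxt])) acc := by
      show (PySem.Dict.getD (pvRev (pvSv manifest)) p []).foldl _ acc = _
      rw [pvRev_getD]
    rw [hBunfold, pvRecA_succ]
    have INNER : ∀ (l : List String), (∀ o ∈ l, o ∈ pvSuccs (pvSv manifest) p) →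
        ∀ (S dep : List String),
        (∀ x ∈ dep, x ∈ S) →
        (∀ x ∈ S, pvReach (pvSv manifest) root x) →
        S.Nodup →
        (∀ x ∈ S, x ∈ (pvSv manifest).map Prod.fst) →
        (∀ x ∈ S, x ∉ p :: P → ∀ y ∈ pvSuccs (pvSv manifest) x, y ∈ S) →
        acc.length ≤ S.length →
        (l.foldl (fun acc nxt => if nxt ∈ acc then acc
              else pvVisitB (pvRev (pvSv manifest)) fB' nxt (acc ++ [nxt])) S
          = PySem.Set.update S (l.foldl
              (fun dep o => PySem.Set.update (PySem.Set.add dep o) (pvRecA manifest fA o)) dep))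
        ∧ (∀ x ∈ PySem.Set.update S (l.foldl
              (fun dep o => PySem.Set.update (PySem.Set.add dep o) (pvRecA manifest fA o)) dep),
            x ∉ p :: P → ∀ y ∈ pvSuccs (pvSv manifest) x,
              y ∈ PySem.Set.update S (l.foldl
                (fun dep o => PySem.Set.update (PySem.Set.add dep o) (pvRecA manifest fA o)) dep))
        ∧ (∀ o ∈ l, o ∈ PySem.Set.update S (l.foldl
              (fun dep o => PySem.Set.update (PySem.Set.add dep o) (pvRecA manifest fA o)) dep))
        ∧ (∀ x ∈ S, x ∈ PySem.Set.update S (l.foldl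
              (fun dep o => PySem.Set.update (PySem.Set.add dep o) (pvRecA manifest fA o)) dep)) := by
      intro l
      induction l with
      | nil =>
        intro _ S dep hdep _ _ _ hSclosed _
        simp only [List.foldl_nil]
        rw [pv_update_of_subset S dep hdep]
        exact ⟨rfl, hSclosed, fun o ho => absurd ho (List.not_mem_nil),
          fun x hx => hx⟩
      | cons o t iht =>
        intro hl S dep hdep hSR hSN hSnames hSclosed hlen
        have ho : o ∈ pvSuccs (pvSv manifest) p := hl o (List.mem_cons_self ..)
        have hl' : ∀ o' ∈ t, o' ∈ pvSuccs (pvSv manifest) p :=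
          fun o' ho' => hl o' (List.mem_cons_of_mem _ ho')
        simp only [List.foldl_cons]
        by_cases hoS : o ∈ S
        · rw [if_pos hoS]
          have hrec_sub : ∀ x ∈ pvRecA manifest fA o, x ∈ S :=
            pv_recA_sub manifest root p o P S fA hPre hanc hSclosed ho hoS
          have hdep' : ∀ x ∈ PySem.Set.update (PySem.Set.add dep o) (pvRecA manifest fA o), x ∈ S := by
            intro x hx
            rcases (PySem.Set.mem_update _ _ _).1 hx with hx | hx
            · rcases (PySem.Set.mem_add _ _ _).1 hx with hx | rfl
              · exact hdep x hx
              · exact hoS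
            · exact hrec_sub x hx
          obtain ⟨hEq2, hP1, hP2, hP3⟩ := iht hl' S _ hdep' hSR hSN hSnames hSclosed hlen
          refine ⟨hEq2, hP1, ?_, hP3⟩
          intro o' ho'
          rcases List.mem_cons.1 ho' with rfl | ho'
          · exact hP3 o' hoS
          · exact hP2 o' ho'
        · rw [if_neg hoS]
          have hrooto : pvReach (pvSv manifest) root o := Relation.ReflTransGen.tail hrootp ho
          have honames : o ∈ (pvSv manifest).map Prod.fst := pv_succs_mem_names _ p o ho
          have hanc' : ∀ q ∈ o :: p :: P,
              pvReach (pvSv manifest) root q ∧ pvReach (pvSv manifest) q o := by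
            intro q hq
            rcases List.mem_cons.1 hq with rfl | hq
            · exact ⟨hrooto, Relation.ReflTransGen.refl⟩
            · exact ⟨(hanc q hq).1, (hanc q hq).2.trans (Relation.ReflTransGen.single ho)⟩
          have hacc'R : ∀ x ∈ S ++ [o], pvReach (pvSv manifest) root x := by
            intro x hx
            rcases List.mem_append.1 hx with hx | hx
            · exact hSR x hx
            · rw [List.mem_singleton] at hx; rw [hx]; exact hrooto
          have hacc'N : (S ++ [o]).Nodup := by
            rw [List.nodup_append]
            refine ⟨hSN, List.nodup_singleton o, ?_⟩
            intro a ha b hb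
            rw [List.mem_singleton] at hb
            rw [hb]
            intro h
            exact hoS (h ▸ ha)
          have hacc'names : ∀ x ∈ S ++ [o], x ∈ (pvSv manifest).map Prod.fst := by
            intro x hx
            rcases List.mem_append.1 hx with hx | hx
            · exact hSnames x hx
            · rw [List.mem_singleton] at hx; rw [hx]; exact honames
          have hclosed' : ∀ x ∈ S ++ [o], x ∉ o :: p :: P →
              ∀ y ∈ pvSuccs (pvSv manifest) x, y ∈ S ++ [o] := by
            intro x hx hxn y hy
            rcases List.mem_append.1 hx with hx | hx
            · exact List.mem_append.2 (Or.inl (hSclosed x hx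
                (fun hc => hxn (List.mem_cons_of_mem _ hc)) y hy))
            · rw [List.mem_singleton] at hx
              exact absurd (hx ▸ List.mem_cons_self ..) hxn
          have hfA' := pv_fA_child manifest root p o fA hPre hrootp ho hfA
          have hfB' : (pvSv manifest).length + 1 ≤ fB' + (S ++ [o]).length := by
            simp only [List.length_append, List.length_cons, List.length_nil]
            omega
          obtain ⟨hEq, hPost1, hPost2⟩ :=
            ihA fB' o (p :: P) (S ++ [o]) hrooto hanc' hacc'R hacc'N hacc'names hclosed' hfA' hfB'
          rw [hEq]
          have hSsub : ∀ x ∈ S, x ∈ PySem.Set.update (S ++ [o]) (pvRecA manifest fA o) := by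
            intro x hx
            exact pv_update_mono _ _ x (List.mem_append.2 (Or.inl hx))
          have hoSnext : o ∈ PySem.Set.update (S ++ [o]) (pvRecA manifest fA o) :=
            pv_update_mono _ _ o (List.mem_append.2 (Or.inr (List.mem_singleton.2 rfl)))
          have hSnextR : ∀ x ∈ PySem.Set.update (S ++ [o]) (pvRecA manifest fA o),
              pvReach (pvSv manifest) root x := by
            intro x hx
            rcases (PySem.Set.mem_update _ _ _).1 hx with hx | hx
            · exact hacc'R x hx
            · rcases pvRecA_sound manifest fA o x hx with ⟨o', ho', hr⟩
              exact hrooto.trans (Relation.ReflTransGen.head ho' hr)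
          have hSnextN : (PySem.Set.update (S ++ [o]) (pvRecA manifest fA o)).Nodup :=
            PySem.Set.nodup_update _ _ hacc'N
          have hSnextNames : ∀ x ∈ PySem.Set.update (S ++ [o]) (pvRecA manifest fA o),
              x ∈ (pvSv manifest).map Prod.fst := by
            intro x hx
            rcases (PySem.Set.mem_update _ _ _).1 hx with hx | hx
            · exact hacc'names x hx
            · exact pvRecA_names manifest fA o x hx
          have hSnextClosed : ∀ x ∈ PySem.Set.update (S ++ [o]) (pvRecA manifest fA o),
              x ∉ p :: P → ∀ y ∈ pvSuccs (pvSv manifest) x,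
                y ∈ PySem.Set.update (S ++ [o]) (pvRecA manifest fA o) := by
            intro x hx hxn y hy
            by_cases hxo : x = o
            · exact hPost2 y (hxo ▸ hy)
            · exact hPost1 x hx (by
                intro hc
                rcases List.mem_cons.1 hc with hc | hc
                · exact hxo hc
                · exact hxn hc) y hy
          have hdep' : ∀ x ∈ PySem.Set.update (PySem.Set.add dep o) (pvRecA manifest fA o),
              x ∈ PySem.Set.update (S ++ [o]) (pvRecA manifest fA o) := by
            intro x hx
            rcases (PySem.Set.mem_update _ _ _).1 hx with hx | hx
            · rcases (PySem.Set.mem_add _ _ _).1 hx with hx | rfl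
              · exact hSsub x (hdep x hx)
              · exact hoSnext
            · exact (PySem.Set.mem_update _ _ _).2 (Or.inr hx)
          have hlen' : acc.length ≤ (PySem.Set.update (S ++ [o]) (pvRecA manifest fA o)).length := by
            have h1 := (pv_update_prefix (S ++ [o]) (pvRecA manifest fA o)).length_le
            simp only [List.length_append, List.length_cons, List.length_nil] at h1
            omega
          obtain ⟨hEq2, hP1, hP2, hP3⟩ := iht hl' (PySem.Set.update (S ++ [o]) (pvRecA manifest fA o))
            (PySem.Set.update (PySem.Set.add dep o) (pvRecA manifest fA o))
            hdep' hSnextR hSnextN hSnextNames hSnextClosed hlen'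
          have hkey : PySem.Set.update S (t.foldl
                (fun dep o => PySem.Set.update (PySem.Set.add dep o) (pvRecA manifest fA o))
                (PySem.Set.update (PySem.Set.add dep o) (pvRecA manifest fA o)))
              = PySem.Set.update (PySem.Set.update (S ++ [o]) (pvRecA manifest fA o)) (t.foldl
                (fun dep o => PySem.Set.update (PySem.Set.add dep o) (pvRecA manifest fA o))
                (PySem.Set.update (PySem.Set.add dep o) (pvRecA manifest fA o))) := by
            obtain ⟨rest, hrest⟩ := pv_foldA_prefix manifest fA t
              (PySem.Set.update (PySem.Set.add dep o) (pvRecA manifest fA o))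
            rw [← hrest, PySem.Set.update_append, PySem.Set.update_append]
            have h1 : PySem.Set.update S (PySem.Set.update (PySem.Set.add dep o) (pvRecA manifest fA o))
                = PySem.Set.update (S ++ [o]) (pvRecA manifest fA o) := by
              rw [pv_update_update, pv_update_add, pv_update_of_subset S dep hdep,
                PySem.Set.add_of_not_mem hoS]
            have h2 : PySem.Set.update (PySem.Set.update (S ++ [o]) (pvRecA manifest fA o))
                (PySem.Set.update (PySem.Set.add dep o) (pvRecA manifest fA o))
                = PySem.Set.update (S ++ [o]) (pvRecA manifest fA o) :=
              pv_update_of_subset _ _ hdep'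
            rw [h1, h2]
          rw [hkey]
          refine ⟨hEq2, hP1, ?_, ?_⟩
          · intro o' ho'
            rcases List.mem_cons.1 ho' with rfl | ho'
            · exact hP3 o' hoSnext
            · exact hP2 o' ho'
          · intro x hx
            exact hP3 x (hSsub x hx)
    obtain ⟨hEq, hP1, hP2, _⟩ := INNER (pvSuccs (pvSv manifest) p) (fun o ho => ho) acc []
      (fun x hx => absurd hx (List.not_mem_nil)) haccR haccN haccNames hclosed (Nat.le_refl _)
    exact ⟨hEq, hP1, hP2⟩

theorem pv_final (service : String) (manifest : PvManifest)
    (hPre : ∀ r ∈ pvClosure (pvSv manifest) [service], r ∉ pvClosure (pvSv manifest) (pvSuccs (pvSv manifest) r)) :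
    get_dependent_services service manifest = get_dependent_services_alt service manifest := by
  have hfA : (pvClosure (pvSv manifest) [service]).length ≤ (pvSv manifest).length + 1 := by
    have hsub : pvClosure (pvSv manifest) [service] ⊆ service :: (pvSv manifest).map Prod.fst := by
      intro x hx
      rcases pv_iter_pool (pvSv manifest) [service] ((pvSv manifest).length + 1) x hx with h | h
      · rw [List.mem_singleton] at h; rw [h]; exact List.mem_cons_self ..
      · exact List.mem_cons_of_mem _ h
    have := ((pvClosure_nodup (pvSv manifest) [service]).subperm hsub).length_le
    simpa using this
  obtain ⟨hEq, -, -⟩ := pvMAIN manifest service hPre ((pvSv manifest).length + 1)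
    ((pvSv manifest).length + 1) service [] []
    Relation.ReflTransGen.refl
    (by intro q hq; rw [List.mem_singleton] at hq; rw [hq]
        exact ⟨Relation.ReflTransGen.refl, Relation.ReflTransGen.refl⟩)
    (fun x hx => absurd hx (List.not_mem_nil))
    List.nodup_nil
    (fun x hx => absurd hx (List.not_mem_nil))
    (fun x hx => absurd hx (List.not_mem_nil))
    hfA
    (by simp)
  show pvRecA manifest ((pvSv manifest).length + 1) service = PySem.Set.ofList _
  rw [hEq]
  rw [PySem.Set.update_nil_left, PySem.Set.ofList_ofList]
  exact (PySem.Set.ofList_eq_self_of_nodup _ (pvRecA_nodup manifest _ service)).symm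

-- ===== VERDICT (by name: the statement is the Claim_ definition above) =====
theorem get_dependent_services_spec : Claim_equal_get_dependent_services := by
  intro service manifest _ hPre
  exact pv_final service manifest hPre
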